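-- pv_equiv track=rewrite | github.com/miliar/Code_Jam_Webscraper | solutions_python/solutions_year17_round0_nr2/1943.py | parse
-- ===== SOURCE A (Python) =====
-- def parse(a):
--     down=0
--     up=0
--     for i in range(1,len(a)):
--         if a[i]>a[i-1]:
--             up=i
--         if a[i]<a[i-1]:
--             down=i
--             break
--     if down ==0:
--         return a
--     elif up==0 and a[0]=='1':
--         return '9'*(len(a)-1)
--     else:
--         return a[:up]+str(int(a[up])-1)+'9'*(len(a)-1-up)
-- ===== SOURCE B (Python) =====
-- def parse(a):
--     # Right-to-left borrow scan: decrement each digit that exceeds its right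
--     # neighbour, marking where the '9' fill must start; drop one leading zero
--     # if the first digit was decremented to '0'.
--     d = list(a)
--     fill = len(d)
--     for i in range(len(d) - 1, 0, -1):
--         if d[i - 1] > d[i]:
--             d[i - 1] = chr(ord(d[i - 1]) - 1)
--             fill = i
--     if fill == len(d):
--         return a
--     res = d[:fill] + ['9'] * (len(d) - fill)
--     if res[0] == '0' and a[0] != '0':
--         del res[0]
--     return ''.join(res)
-- ===== Notes on version B (the rewrite author's own statement) =====
-- stated objective: alternative
-- what changed: Replaces A's forward scan (tracking the last ascent and breaking at the first descent, then splicing prefix + decremented digit + nines) with a right-to-left borrow propagation over a mutable digit buffer and a fill marker, filling nines from the marker and dropping one leading zero only when the first digit was decremented to '0'.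
-- outside the precondition, e.g. on parse('0/'): A returns '-19', B returns '/9'; on parse('ba'): A raises ValueError, B returns 'a9'
import Mathlib
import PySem

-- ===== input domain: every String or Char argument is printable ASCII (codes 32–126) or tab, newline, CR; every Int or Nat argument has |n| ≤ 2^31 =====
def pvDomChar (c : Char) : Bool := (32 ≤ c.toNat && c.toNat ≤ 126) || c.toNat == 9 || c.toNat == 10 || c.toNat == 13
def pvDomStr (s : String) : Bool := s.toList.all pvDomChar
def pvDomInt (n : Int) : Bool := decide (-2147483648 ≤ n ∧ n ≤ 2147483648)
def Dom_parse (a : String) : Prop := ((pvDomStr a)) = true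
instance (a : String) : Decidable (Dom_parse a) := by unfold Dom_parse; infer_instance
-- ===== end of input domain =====

-- B replaces A's forward first-descent scan by a right-to-left borrow propagation over a
-- digit buffer with a fill marker (objective: alternative algorithm, same cost).

-- ===== PORT A =====
-- A's loop `for i in range(1, len(a)): ...` with its break, as index recursion.
-- Every read is at 0 ≤ i-1 < i < s.length, so getD's default ' ' is never consulted.
def parseLoopA (s : List Char) (i : Nat) (up : Int) : Int × Int :=
  if _h : i < s.length then
    let up' : Int := if s.getD (i - 1) ' ' < s.getD i ' ' then (i : Int) else up
    if s.getD i ' ' < s.getD (i - 1) ' ' then ((i : Int), up')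
    else parseLoopA s (i + 1) up'
  else (0, up)
termination_by s.length - i

def parse (a : String) : String :=
  let s := a.toList
  let r := parseLoopA s 1 0
  if r.1 == 0 then a
  else if r.2 == 0 && (s.getD 0 ' ' == '1') then String.ofList (List.replicate (s.length - 1) '9')
  else
    -- `int(a[up])` : ofStr? = none is exactly Python's ValueError; excluded by Pre_parse.
    -- r.2 (up) is 0 or a loop index, hence ≥ 0: toNat is exact.
    match PySem.Int.ofStr? (String.ofList [s.getD r.2.toNat ' ']) with
    | some q => String.ofList (s.take r.2.toNat ++ (PySem.Int.toStr (q - 1)).toList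
                            ++ List.replicate (s.length - 1 - r.2.toNat) '9')
    | none => ""

-- ===== PORT B =====
-- B's loop `for i in range(len(d)-1, 0, -1)`: the Nat argument is the current index,
-- counting down to 1; reads at i-1, i ≤ len-1 are in range, getD's default unused.
def parseLoopB : List Char → Int → Nat → List Char × Int
  | d, fill, 0 => (d, fill)
  | d, fill, i + 1 =>
    if d.getD (i + 1) ' ' < d.getD i ' ' then
      parseLoopB (d.set i (Char.ofNat ((d.getD i ' ').toNat - 1))) ((i : Int) + 1) i
    else parseLoopB d fill i

def parse_alt (a : String) : String :=
  let d := a.toList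
  let r := parseLoopB d (d.length : Int) (d.length - 1)
  if r.2 == (d.length : Int) then a
  else
    -- fill (r.2) is len or a loop index ≥ 1, hence ≥ 0: toNat is exact.
    let res := r.1.take r.2.toNat ++ List.replicate (d.length - r.2.toNat) '9'
    let res' := if res.getD 0 ' ' == '0' && !(d.getD 0 ' ' == '0') then res.tail else res
    String.ofList res'

-- ===== PRECONDITION & SPEC =====
-- index of the first adjacent descent: smallest k with s[k+1] < s[k]
def firstDescent : List Char → Option Nat
  | [] => none
  | [_] => none
  | x :: y :: t => if y < x then some 0 else (firstDescent (y :: t)).map (· + 1)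

-- Pre_parse excludes the inputs on which A yields no normal value: when the string has an
-- adjacent descent and the character just before the first descent is not '1'..'9',
-- Python's int() raises ValueError (non-digit), or — for '0' — A returns the two-character
-- "-1" artefact of str(int('0')-1), an accident of A's round-trip through int.
def Pre_parse (a : String) : Prop :=
  ((firstDescent a.toList).all
    (fun k => decide ('1' ≤ a.toList.getD k ' ') && decide (a.toList.getD k ' ' ≤ '9'))) = true
instance (a : String) : Decidable (Pre_parse a) := by unfold Pre_parse; infer_instance

def pvWitness_parse : String := "310"

def Spec_parse (a : String) (out : String) : Prop := out = parse_alt a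
instance (a : String) (out : String) : Decidable (Spec_parse a out) := by unfold Spec_parse; infer_instance

-- ===== CLAIM (what is proved, stated in full; the proofs are below) =====
def Claim_equal_parse : Prop := ∀ (a : String), Dom_parse a → Pre_parse a → Spec_parse a (parse a)

-- ===== LEMMAS AND PROOFS =====

-- Char order in terms of codepoints
theorem charPred_le (c : Char) : Char.ofNat (c.toNat - 1) ≤ c := by
  rw [Char.le_def, UInt32.le_iff_toNat_le]
  have h1 : (Char.ofNat (c.toNat - 1)).val.toNat = (Char.ofNat (c.toNat - 1)).toNat := rfl
  have h2 : c.val.toNat = c.toNat := rfl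
  rw [h1, h2, Char.toNat_ofNat]
  split <;> omega

theorem charPred_toNat (c : Char) (h : 1 ≤ c.toNat) (h' : c.toNat < 0xd800) :
    (Char.ofNat (c.toNat - 1)).toNat = c.toNat - 1 := by
  rw [Char.toNat_ofNat]
  have : (c.toNat - 1).isValidChar := Or.inl (by omega)
  simp [this]

theorem char_lt_toNat {a b : Char} : a < b ↔ a.toNat < b.toNat := by
  rw [Char.lt_def, UInt32.lt_iff_toNat_lt]; rfl

theorem char_le_toNat {a b : Char} : a ≤ b ↔ a.toNat ≤ b.toNat := by
  rw [Char.le_def, UInt32.le_iff_toNat_le]; rfl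

theorem v_toNat_bounds (v : Char) (h1 : '1' ≤ v) (h9 : v ≤ '9') :
    49 ≤ v.toNat ∧ v.toNat ≤ 57 := by
  rw [char_le_toNat] at h1 h9
  have ha : ('1':Char).toNat = 49 := rfl
  have hb : ('9':Char).toNat = 57 := rfl
  omega

theorem v_cases (v : Char) (h1 : '1' ≤ v) (h9 : v ≤ '9') :
    v = '1' ∨ v = '2' ∨ v = '3' ∨ v = '4' ∨ v = '5' ∨ v = '6' ∨ v = '7' ∨ v = '8' ∨ v = '9' := by
  have hb := v_toNat_bounds v h1 h9
  have e := (Char.ofNat_toNat v).symm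
  have h : v.toNat = 49 ∨ v.toNat = 50 ∨ v.toNat = 51 ∨ v.toNat = 52 ∨ v.toNat = 53 ∨
      v.toNat = 54 ∨ v.toNat = 55 ∨ v.toNat = 56 ∨ v.toNat = 57 := by omega
  rcases h with h|h|h|h|h|h|h|h|h <;> rw [h] at e <;> tauto

theorem digit_facts (v : Char) (h1 : '1' ≤ v) (h9 : v ≤ '9') :
    PySem.Int.ofStr? (String.ofList [v]) = some ((v.toNat : Int) - 48) ∧
    (PySem.Int.toStr ((v.toNat : Int) - 48 - 1)).toList = [Char.ofNat (v.toNat - 1)] := by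
  rcases v_cases v h1 h9 with h|h|h|h|h|h|h|h|h <;> subst h <;> exact ⟨by decide, by decide⟩

-- getD within take
theorem getD_take {α : Type} [Inhabited α] (l : List α) (n j : Nat) (d : α) (h : j < n) :
    (l.take n).getD j d = l.getD j d := by
  simp [List.getD_eq_getElem?_getD, h]

-- chain gives adjacent getD-inequalities
theorem chain_getD (u : List Char) (h : u.IsChain (· ≤ ·)) (j : Nat) (hj : j + 1 < u.length) :
    u.getD j ' ' ≤ u.getD (j+1) ' ' := by
  rw [List.getD_eq_getElem u ' ' (by omega), List.getD_eq_getElem u ' ' hj]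
  rw [List.isChain_iff_getElem] at h
  exact h j (by omega)

theorem last_getD (u : List Char) (v : Char) (h : ∀ c ∈ u.getLast?, c < v) (hne : u ≠ []) :
    u.getD (u.length - 1) ' ' < v := by
  have hl : 0 < u.length := List.length_pos_iff.mpr hne
  rw [List.getD_eq_getElem u ' ' (by omega)]
  exact h _ (by rw [List.getLast?_eq_getElem?]; exact List.getElem?_eq_getElem (by omega))

-- getD on the decomposed string  s = u ++ v^(P+1) ++ w :: t
theorem sget_u (u : List Char) (P : Nat) (v w : Char) (t : List Char) (j : Nat) (hj : j < u.length) :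
    (u ++ (List.replicate (P+1) v ++ w :: t)).getD j ' ' = u.getD j ' ' :=
  List.getD_append _ _ _ _ hj

theorem sget_v (u : List Char) (P : Nat) (v w : Char) (t : List Char) (j : Nat)
    (hj1 : u.length ≤ j) (hj2 : j < u.length + P + 1) :
    (u ++ (List.replicate (P+1) v ++ w :: t)).getD j ' ' = v := by
  rw [List.getD_append_right _ _ _ _ hj1]
  rw [List.getD_append _ _ _ _ (by simp; omega)]
  have h3 : j - u.length < P + 1 := by omega
  simp [List.getD_eq_getElem?_getD, h3]

theorem sget_w (u : List Char) (P : Nat) (v w : Char) (t : List Char) :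
    (u ++ (List.replicate (P+1) v ++ w :: t)).getD (u.length + P + 1) ' ' = w := by
  rw [List.getD_append_right _ _ _ _ (by omega)]
  have e : u.length + P + 1 - u.length = P + 1 := by omega
  rw [e, List.getD_append_right _ _ _ _ (by simp)]
  simp

theorem s_len (u : List Char) (P : Nat) (v w : Char) (t : List Char) :
    (u ++ (List.replicate (P+1) v ++ w :: t)).length = u.length + P + 2 + t.length := by
  simp; omega

theorem s_take_down (u : List Char) (P : Nat) (v w : Char) (t : List Char) :
    (u ++ (List.replicate (P+1) v ++ w :: t)).take (u.length + P + 1)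
      = u ++ (List.replicate P v ++ [v]) := by
  rw [List.take_append, List.take_of_length_le (by omega)]
  have e : u.length + P + 1 - u.length = P + 1 := by omega
  rw [e, List.take_append, List.take_of_length_le (by simp)]
  have e2 : P + 1 - (List.replicate (P+1) v).length = 0 := by simp
  rw [e2]
  simp [List.replicate_succ']

-- ---- no-descent case ----
theorem fd_none_nd (s : List Char) (h : firstDescent s = none) :
    ∀ j, j + 1 < s.length → ¬ (s.getD (j+1) ' ' < s.getD j ' ') := by
  induction s with
  | nil => intro j hj; simp at hj
  | cons x s ih =>
    cases s with
    | nil => intro j hj; simp at hj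
    | cons y t =>
      rw [firstDescent] at h
      split at h
      · simp at h
      · intro j hj
        cases j with
        | zero => simpa using ‹¬ y < x›
        | succ j =>
          have h' : firstDescent (y :: t) = none := by
            cases hfd : firstDescent (y :: t) with
            | none => rfl
            | some k => rw [hfd] at h; simp at h
          simpa using ih h' j (by simpa using hj)

theorem loopA_nd (s : List Char) (hnd : ∀ j, j + 1 < s.length → ¬ (s.getD (j+1) ' ' < s.getD j ' ')) :
    ∀ fuel i up, s.length - i ≤ fuel → 1 ≤ i → (parseLoopA s i up).1 = 0 := by
  intro fuel
  induction fuel with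
  | zero =>
    intro i up hf h1
    rw [parseLoopA]
    rw [dif_neg (by omega)]
  | succ fuel ih =>
    intro i up hf h1
    rw [parseLoopA]
    by_cases hi : i < s.length
    · rw [dif_pos hi]
      have hnd' := hnd (i-1) (by omega)
      have e : i - 1 + 1 = i := by omega
      rw [e] at hnd'
      rw [if_neg hnd']
      exact ih (i+1) _ (by omega) (by omega)
    · rw [dif_neg hi]

theorem loopB_nd (s : List Char) (hnd : ∀ j, j + 1 < s.length → ¬ (s.getD (j+1) ' ' < s.getD j ' ')) :
    ∀ i, i < s.length → ∀ fill, parseLoopB s fill i = (s, fill) := by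
  intro i
  induction i with
  | zero => intro _ fill; rfl
  | succ i ih =>
    intro hi fill
    rw [parseLoopB]
    rw [if_neg (hnd i hi)]
    exact ih (by omega) fill

theorem parse_eq_sorted (a : String) (h : firstDescent a.toList = none) : parse a = parse_alt a := by
  have hnd := fd_none_nd a.toList h
  have hA : (parseLoopA a.toList 1 0).1 = 0 :=
    loopA_nd a.toList hnd (a.toList.length) 1 0 (by omega) (by omega)
  have hB : ∀ fill, parseLoopB a.toList fill (a.toList.length - 1) = (a.toList, fill) := by
    intro fill
    cases hn : a.toList.length with
    | zero => rfl
    | succ n => simpa using loopB_nd a.toList hnd n (by rw [hn]; omega) fill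
  unfold parse parse_alt
  simp only [hB]
  rw [if_pos (by simpa using hA), if_pos (by simp)]

-- ---- decomposition at the first descent ----
theorem fd_decomp (s : List Char) (k : Nat) (h : firstDescent s = some k) :
    ∃ u P w t, s = u ++ (List.replicate (P+1) (s.getD k ' ') ++ w :: t) ∧
      u.length + P = k ∧ u.IsChain (· ≤ ·) ∧
      (∀ c ∈ u.getLast?, c < s.getD k ' ') ∧ w < s.getD k ' ' := by
  induction s generalizing k with
  | nil => simp [firstDescent] at h
  | cons x s ih =>
    cases s with
    | nil => simp [firstDescent] at h
    | cons y t =>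
      rw [firstDescent] at h
      split at h
      · -- y < x : first descent at 0
        simp at h
        subst h
        exact ⟨[], 0, y, t, by simp, by simp, by simp, by simp, by simpa using ‹y < x›⟩
      · -- no descent at 0: x ≤ y
        have hxy : x ≤ y := le_of_not_gt ‹¬ y < x›
        cases hfd : firstDescent (y :: t) with
        | none => rw [hfd] at h; simp at h
        | some k' =>
          rw [hfd] at h
          simp at h
          subst h
          obtain ⟨u, P, w, t', hs, hk, hch, hlast, hw⟩ := ih k' hfd
          have hg : (x :: y :: t).getD (k' + 1) ' ' = (y :: t).getD k' ' ' := by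
            simp
          rw [hg]
          cases u with
          | nil =>
            have hk' : P = k' := by simpa using hk
            have hy : y = (y :: t).getD k' ' ' := by
              have := congrArg (fun l => l.headD ' ') hs
              simpa [List.replicate_succ] using this
            by_cases hxy' : x = y
            · refine ⟨[], P+1, w, t', ?_, by simp only [List.length_nil]; omega, by simp, by simp, hw⟩
              have hx : x = (y :: t).getD k' ' ' := hxy'.trans hy
              simp only [List.nil_append] at hs
              calc x :: y :: t
                  = x :: (List.replicate (P+1) ((y :: t).getD k' ' ') ++ w :: t') := by
                    rw [← hs]
                _ = [] ++ (List.replicate (P+1+1) ((y :: t).getD k' ' ') ++ w :: t') := by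
                    simp [List.replicate_succ, hx]
            · refine ⟨[x], P, w, t',
                by simpa using congrArg (List.cons x) hs,
                by simp only [List.length_cons, List.length_nil]; omega, by simp, ?_, hw⟩
              intro c hc
              simp at hc
              subst hc
              rw [← hy]
              exact lt_of_le_of_ne hxy hxy'
          | cons c u' =>
            refine ⟨x :: c :: u', P, w, t', ?_, by simp only [List.length_cons] at hk ⊢; omega, ?_, ?_, hw⟩
            · simpa using congrArg (List.cons x) hs
            · rw [List.isChain_cons_cons]
              refine ⟨?_, hch⟩
              have : y = c := by
                have := congrArg (fun l => l.headD ' ') hs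
                simpa using this
              rw [← this] at *
              exact hxy
            · intro d hd
              apply hlast
              simpa using hd

-- ---- A's loop on the decomposed string ----
theorem loopA_atDown (u : List Char) (P : Nat) (v w : Char) (t : List Char) (hw : w < v) :
    ∀ up, parseLoopA (u ++ (List.replicate (P+1) v ++ w :: t)) (u.length + P + 1) up
      = (((u.length + P + 1 : Nat) : Int), up) := by
  intro up
  rw [parseLoopA, dif_pos (by rw [s_len]; omega)]
  have e1 : u.length + P + 1 - 1 = u.length + P := by omega
  rw [e1, sget_w, sget_v u P v w t _ (by omega) (by omega)]
  rw [if_neg (lt_asymm hw), if_pos hw]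

theorem loopA_plateau (u : List Char) (P : Nat) (v w : Char) (t : List Char) (hw : w < v) :
    ∀ fuel i up, u.length + P + 1 - i ≤ fuel → u.length + 1 ≤ i → i ≤ u.length + P + 1 →
      parseLoopA (u ++ (List.replicate (P+1) v ++ w :: t)) i up = (((u.length + P + 1 : Nat) : Int), up) := by
  intro fuel
  induction fuel with
  | zero =>
    intro i up hf h1 h2
    have : i = u.length + P + 1 := by omega
    subst this
    exact loopA_atDown u P v w t hw up
  | succ fuel ih =>
    intro i up hf h1 h2
    by_cases hd : i = u.length + P + 1
    · subst hd; exact loopA_atDown u P v w t hw up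
    · rw [parseLoopA, dif_pos (by rw [s_len]; omega)]
      rw [sget_v u P v w t i (by omega) (by omega),
          sget_v u P v w t (i-1) (by omega) (by omega)]
      rw [if_neg (lt_irrefl v), if_neg (lt_irrefl v)]
      exact ih (i+1) up (by omega) (by omega) (by omega)

theorem loopA_prefix (u : List Char) (P : Nat) (v w : Char) (t : List Char)
    (hch : u.IsChain (· ≤ ·)) (hlast : ∀ c ∈ u.getLast?, c < v) (hw : w < v) :
    ∀ fuel i up, u.length - i ≤ fuel → 1 ≤ i → i ≤ u.length →
      parseLoopA (u ++ (List.replicate (P+1) v ++ w :: t)) i up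
        = (((u.length + P + 1 : Nat) : Int), ((u.length : Nat) : Int)) := by
  intro fuel
  induction fuel with
  | zero =>
    intro i up hf h1 h2
    have hi : i = u.length := by omega
    subst hi
    rw [parseLoopA, dif_pos (by rw [s_len]; omega)]
    have hlt : u.getD (u.length - 1) ' ' < v := last_getD u v hlast (by intro hn; simp [hn] at h1)
    rw [sget_v u P v w t u.length (by omega) (by omega),
        sget_u u P v w t (u.length - 1) (by omega)]
    rw [if_pos hlt, if_neg (lt_asymm hlt)]
    exact loopA_plateau u P v w t hw (P+1) (u.length+1) _ (by omega) (by omega) (by omega)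
  | succ fuel ih =>
    intro i up hf h1 h2
    by_cases hd : i = u.length
    · exact ih i up (by omega) h1 (by omega)
    · rw [parseLoopA, dif_pos (by rw [s_len]; omega)]
      rw [sget_u u P v w t i (by omega), sget_u u P v w t (i-1) (by omega)]
      have hle : u.getD (i-1) ' ' ≤ u.getD i ' ' := by
        have := chain_getD u hch (i-1) (by omega)
        have e : i - 1 + 1 = i := by omega
        rwa [e] at this
      rw [if_neg (not_lt.mpr hle)]
      split <;> exact ih (i+1) _ (by omega) (by omega) (by omega)

theorem loopA_main (u : List Char) (P : Nat) (v w : Char) (t : List Char)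
    (hch : u.IsChain (· ≤ ·)) (hlast : ∀ c ∈ u.getLast?, c < v) (hw : w < v) :
    parseLoopA (u ++ (List.replicate (P+1) v ++ w :: t)) 1 0
      = (((u.length + P + 1 : Nat) : Int), ((u.length : Nat) : Int)) := by
  rcases Nat.eq_zero_or_pos u.length with h0 | hpos
  · have := loopA_plateau u P v w t hw (P+1) 1 0 (by omega) (by omega) (by omega)
    simp only [h0] at this ⊢
    exact_mod_cast this
  · exact loopA_prefix u P v w t hch hlast hw u.length 1 0 (by omega) (by omega) (by omega)

-- ---- B's loop on the decomposed string ----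
theorem loopB_prefix (u junk : List Char) (v : Char)
    (hch : u.IsChain (· ≤ ·)) (hlast : ∀ c ∈ u.getLast?, c < v)
    (hv1 : '1' ≤ v) (hv9 : v ≤ '9') :
    ∀ i, i ≤ u.length → ∀ fill,
      parseLoopB (u ++ Char.ofNat (v.toNat - 1) :: junk) fill i
        = (u ++ Char.ofNat (v.toNat - 1) :: junk, fill) := by
  have hb := v_toNat_bounds v hv1 hv9
  have hpv : (Char.ofNat (v.toNat - 1)).toNat = v.toNat - 1 := charPred_toNat v (by omega) (by omega)
  intro i
  induction i with
  | zero => intro _ fill; rfl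
  | succ i ih =>
    intro hi fill
    rw [parseLoopB]
    rw [if_neg ?_]
    · exact ih (by omega) fill
    · by_cases he : i + 1 = u.length
      · rw [he, List.getD_append_right _ _ _ _ (by omega)]
        simp only [Nat.sub_self, List.getD_cons_zero]
        rw [List.getD_append _ _ _ _ (by omega)]
        have hlt : u.getD (u.length - 1) ' ' < v := last_getD u v hlast (by intro hn; simp [hn] at he)
        have : u.getD (u.length - 1) ' ' ≤ Char.ofNat (v.toNat - 1) := by
          rw [char_le_toNat, hpv]
          rw [char_lt_toNat] at hlt
          omega
        have e : i = u.length - 1 := by omega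
        rw [e]
        exact not_lt.mpr this
      · rw [List.getD_append _ _ _ _ (by omega), List.getD_append _ _ _ _ (by omega)]
        have := chain_getD u hch i (by omega)
        exact not_lt.mpr this

theorem loopB_plateau (u : List Char) (v : Char)
    (hch : u.IsChain (· ≤ ·)) (hlast : ∀ c ∈ u.getLast?, c < v)
    (hv1 : '1' ≤ v) (hv9 : v ≤ '9') :
    ∀ (k : Nat) (junk : List Char), ∃ junk',
      parseLoopB (u ++ (List.replicate k v ++ Char.ofNat (v.toNat - 1) :: junk))
          (((u.length + k : Nat) : Int) + 1) (u.length + k)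
        = (u ++ Char.ofNat (v.toNat - 1) :: junk', ((u.length : Nat) : Int) + 1) := by
  have hb := v_toNat_bounds v hv1 hv9
  have hpv : (Char.ofNat (v.toNat - 1)).toNat = v.toNat - 1 := charPred_toNat v (by omega) (by omega)
  intro k
  induction k with
  | zero =>
    intro junk
    refine ⟨junk, ?_⟩
    simpa using loopB_prefix u junk v hch hlast hv1 hv9 u.length (by omega) _
  | succ k ih =>
    intro junk
    have hadd : u.length + (k + 1) = (u.length + k) + 1 := by omega
    rw [hadd, parseLoopB]
    have hg1 : (u ++ (List.replicate (k+1) v ++ Char.ofNat (v.toNat - 1) :: junk)).getD (u.length + k + 1) ' '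
        = Char.ofNat (v.toNat - 1) := by
      rw [List.getD_append_right _ _ _ _ (by omega)]
      have e : u.length + k + 1 - u.length = k + 1 := by omega
      rw [e, List.getD_append_right _ _ _ _ (by simp)]
      simp
    have hg2 : (u ++ (List.replicate (k+1) v ++ Char.ofNat (v.toNat - 1) :: junk)).getD (u.length + k) ' '
        = v := by
      rw [List.getD_append_right _ _ _ _ (by omega)]
      have e : u.length + k - u.length = k := by omega
      rw [e, List.getD_append _ _ _ _ (by simp)]
      have h3 : k < k + 1 := by omega
      simp [List.getD_eq_getElem?_getD, h3]
    rw [hg1, hg2]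
    rw [if_pos (by rw [char_lt_toNat, hpv]; omega)]
    have hset : (u ++ (List.replicate (k+1) v ++ Char.ofNat (v.toNat - 1) :: junk)).set (u.length + k)
        (Char.ofNat (v.toNat - 1))
        = u ++ (List.replicate k v ++ Char.ofNat (v.toNat - 1) :: (Char.ofNat (v.toNat - 1) :: junk)) := by
      rw [List.set_append_right _ _ (by omega)]
      have e : u.length + k - u.length = k := by omega
      rw [e]
      congr 1
      rw [List.replicate_succ', List.append_assoc, List.set_append_right _ _ (by simp)]
      simp
    rw [hset]
    obtain ⟨junk', hj⟩ := ih (Char.ofNat (v.toNat - 1) :: junk)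
    exact ⟨junk', hj⟩

theorem loopB_atDown (u : List Char) (P : Nat) (v w : Char) (t : List Char)
    (hch : u.IsChain (· ≤ ·)) (hlast : ∀ c ∈ u.getLast?, c < v) (hw : w < v)
    (hv1 : '1' ≤ v) (hv9 : v ≤ '9') :
    ∀ d fill, d.length = (u ++ (List.replicate (P+1) v ++ w :: t)).length →
      d.take (u.length + P + 1) = (u ++ (List.replicate (P+1) v ++ w :: t)).take (u.length + P + 1) →
      d.getD (u.length + P + 1) ' ' ≤ w →
      ∃ junk', parseLoopB d fill (u.length + P + 1)
        = (u ++ Char.ofNat (v.toNat - 1) :: junk', ((u.length : Nat) : Int) + 1) := by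
  intro d fill hlen htake hgd
  have hdlen : d.length = u.length + P + 2 + t.length := by rw [hlen, s_len]
  have hdv : d.getD (u.length + P) ' ' = v := by
    calc d.getD (u.length + P) ' '
        = (d.take (u.length + P + 1)).getD (u.length + P) ' ' :=
          (getD_take d _ _ _ (by omega)).symm
      _ = ((u ++ (List.replicate (P+1) v ++ w :: t)).take (u.length + P + 1)).getD (u.length + P) ' ' := by
          rw [htake]
      _ = (u ++ (List.replicate (P+1) v ++ w :: t)).getD (u.length + P) ' ' :=
          getD_take _ _ _ _ (by omega)
      _ = v := sget_v u P v w t _ (by omega) (by omega)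
  rw [parseLoopB, hdv, if_pos (lt_of_le_of_lt hgd hw)]
  have hset : d.set (u.length + P) (Char.ofNat (v.toNat - 1))
      = u ++ (List.replicate P v ++ Char.ofNat (v.toNat - 1) :: d.drop (u.length + P + 1)) := by
    conv_lhs => rw [← List.take_append_drop (u.length + P + 1) d]
    rw [List.set_append_left _ _ (by rw [List.length_take]; omega)]
    rw [htake, s_take_down]
    rw [List.set_append_right _ _ (by omega)]
    have e : u.length + P - u.length = P := by omega
    rw [e, List.set_append_right _ _ (by simp)]
    simp
  rw [hset]
  exact loopB_plateau u v hch hlast hv1 hv9 P (d.drop (u.length + P + 1))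

theorem loopB_suffix (u : List Char) (P : Nat) (v w : Char) (t : List Char)
    (hch : u.IsChain (· ≤ ·)) (hlast : ∀ c ∈ u.getLast?, c < v) (hw : w < v)
    (hv1 : '1' ≤ v) (hv9 : v ≤ '9') :
    ∀ fuel i, i - (u.length + P + 1) ≤ fuel → u.length + P + 1 ≤ i →
      ∀ d fill, d.length = (u ++ (List.replicate (P+1) v ++ w :: t)).length →
        d.take (u.length + P + 1) = (u ++ (List.replicate (P+1) v ++ w :: t)).take (u.length + P + 1) →
        d.getD (u.length + P + 1) ' ' ≤ w →
        ∃ junk', parseLoopB d fill i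
          = (u ++ Char.ofNat (v.toNat - 1) :: junk', ((u.length : Nat) : Int) + 1) := by
  intro fuel
  induction fuel with
  | zero =>
    intro i hf hi d fill hlen htake hgd
    have : i = u.length + P + 1 := by omega
    subst this
    exact loopB_atDown u P v w t hch hlast hw hv1 hv9 d fill hlen htake hgd
  | succ fuel ih =>
    intro i hf hi d fill hlen htake hgd
    by_cases hd : i = u.length + P + 1
    · subst hd
      exact loopB_atDown u P v w t hch hlast hw hv1 hv9 d fill hlen htake hgd
    · obtain ⟨m, rfl⟩ : ∃ m, i = m + 1 := ⟨i - 1, by omega⟩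
      have hm : u.length + P + 1 ≤ m := by omega
      rw [parseLoopB]
      split
      · -- decrement at position m ≥ down: all invariants are preserved
        refine ih m (by omega) (by omega) _ _ (by simpa using hlen) ?_ ?_
        · rw [List.take_set_of_le (by omega)]; exact htake
        · by_cases he : m = u.length + P + 1
          · subst he
            have hlt : u.length + P + 1 < d.length := by rw [hlen, s_len]; omega
            have hgoal : (d.set (u.length + P + 1)
                  (Char.ofNat ((d.getD (u.length + P + 1) ' ').toNat - 1))).getD (u.length + P + 1) ' '
                = Char.ofNat ((d.getD (u.length + P + 1) ' ').toNat - 1) := by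
              simp [List.getD_eq_getElem?_getD, hlt]
            rw [hgoal]
            exact le_trans (charPred_le _) hgd
          · rw [List.getD_eq_getElem?_getD, List.getElem?_set_ne (by omega), ← List.getD_eq_getElem?_getD]
            exact hgd
      · exact ih m (by omega) (by omega) d fill hlen htake hgd

theorem loopB_main (u : List Char) (P : Nat) (v w : Char) (t : List Char)
    (hch : u.IsChain (· ≤ ·)) (hlast : ∀ c ∈ u.getLast?, c < v) (hw : w < v)
    (hv1 : '1' ≤ v) (hv9 : v ≤ '9') :
    ∃ junk', parseLoopB (u ++ (List.replicate (P+1) v ++ w :: t))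
        (((u ++ (List.replicate (P+1) v ++ w :: t)).length : Nat) : Int)
        ((u ++ (List.replicate (P+1) v ++ w :: t)).length - 1)
      = (u ++ Char.ofNat (v.toNat - 1) :: junk', ((u.length : Nat) : Int) + 1) := by
  refine loopB_suffix u P v w t hch hlast hw hv1 hv9
    ((u ++ (List.replicate (P+1) v ++ w :: t)).length)
    ((u ++ (List.replicate (P+1) v ++ w :: t)).length - 1) (by omega) (by rw [s_len]; omega)
    _ _ rfl rfl ?_
  exact le_of_eq (sget_w u P v w t)

theorem parse_eq_descent (a : String) (u : List Char) (P : Nat) (v w : Char) (t : List Char)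
    (hs : a.toList = u ++ (List.replicate (P+1) v ++ w :: t))
    (hch : u.IsChain (· ≤ ·)) (hlast : ∀ c ∈ u.getLast?, c < v) (hw : w < v)
    (hv1 : '1' ≤ v) (hv9 : v ≤ '9') : parse a = parse_alt a := by
  have hA := loopA_main u P v w t hch hlast hw
  obtain ⟨junk', hB⟩ := loopB_main u P v w t hch hlast hw hv1 hv9
  obtain ⟨hof, hts⟩ := digit_facts v hv1 hv9
  have hb := v_toNat_bounds v hv1 hv9
  have hpv : (Char.ofNat (v.toNat - 1)).toNat = v.toNat - 1 := charPred_toNat v (by omega) (by omega)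
  unfold parse parse_alt
  rw [hs]
  simp only [hA, hB]
  simp only [Int.toNat_natCast]
  have e3 : ((u.length : Int) + 1).toNat = u.length + 1 := by omega
  rw [e3, s_len]
  rw [if_neg (by simp; omega)]
  rw [sget_v u P v w t u.length (by omega) (by omega), hof]
  have eA : (u ++ (List.replicate (P+1) v ++ w :: t)).take u.length = u := List.take_left
  have eB : (u ++ Char.ofNat (v.toNat - 1) :: junk').take (u.length + 1)
      = u ++ [Char.ofNat (v.toNat - 1)] := by
    rw [List.take_append, List.take_of_length_le (by omega)]
    have e : u.length + 1 - u.length = 1 := by omega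
    rw [e]
    simp
  rw [eA, eB]
  conv_rhs => rw [if_neg (show ¬(((u.length : Int) + 1 ==
    ((u.length + P + 2 + t.length : Nat) : Int)) = true) by simp; omega)]
  have ecnt : u.length + P + 2 + t.length - 1 - u.length
      = u.length + P + 2 + t.length - (u.length + 1) := by omega
  rcases Nat.eq_zero_or_pos u.length with hL0 | hLpos
  · -- no ascent before the plateau: the decrement happens at position 0
    have hu : u = [] := List.eq_nil_of_length_eq_zero hL0
    subst hu
    have g1 : (([] : List Char) ++ (List.replicate (P+1) v ++ w :: t)).getD 0 ' ' = v :=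
      sget_v [] P v w t 0 (by simp) (by simp)
    rw [g1]
    by_cases hv' : v = '1'
    · subst hv'
      rw [if_pos (by simp)]
      have hz : Char.ofNat (('1':Char).toNat - 1) = '0' := by decide
      rw [hz, if_pos (by simp)]
      simp
    · rw [if_neg (by simp [hv'])]
      have hpv0 : (Char.ofNat (v.toNat - 1) == '0') = false := by
        refine beq_eq_false_iff_ne.mpr ?_
        intro h
        apply hv'
        have h1 : v.toNat - 1 = 48 := by
          have := congrArg Char.toNat h
          rw [hpv] at this
          simpa using this
        have e := (Char.ofNat_toNat v).symm
        have h2 : v.toNat = 49 := by omega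
        rw [h2] at e
        simpa using e
      rw [show (([] : List Char) ++ [Char.ofNat (v.toNat - 1)]
            ++ List.replicate ([].length + P + 2 + t.length - ([].length + 1)) '9').getD 0 ' '
          = Char.ofNat (v.toNat - 1) by simp]
      rw [hpv0, Bool.false_and, if_neg (by simp)]
      simp [hts]
  · -- ascent exists: position 0 is untouched, no leading zero can appear
    have c2 : ((u.length : Int) == 0) = false := by
      simp only [beq_eq_false_iff_ne, ne_eq, Int.natCast_eq_zero]
      omega
    rw [c2, Bool.false_and, if_neg (by simp)]
    have g1 : (u ++ (List.replicate (P+1) v ++ w :: t)).getD 0 ' ' = u.getD 0 ' ' :=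
      sget_u u P v w t 0 (by omega)
    have g2 : ((u ++ [Char.ofNat (v.toNat - 1)])
        ++ List.replicate (u.length + P + 2 + t.length - (u.length + 1)) '9').getD 0 ' '
        = u.getD 0 ' ' := by
      have h1 : 0 < (u ++ [Char.ofNat (v.toNat - 1)]).length := by simp
      rw [List.getD_append _ _ _ _ h1]
      exact List.getD_append _ _ _ _ hLpos
    rw [g1, g2, Bool.and_not_self, if_neg (by simp)]
    simp only [hts]
    have ecnt2 : u.length + P + 1 + t.length - u.length
        = u.length + P + 2 + t.length - (u.length + 1) := by omega
    simp [ecnt2]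

-- ===== VERDICT (by name: the statement is the Claim_ definition above) =====
theorem parse_spec : Claim_equal_parse := by
  unfold Claim_equal_parse
  intro a _hD hPre
  unfold Spec_parse
  cases hfd : firstDescent a.toList with
  | none => exact parse_eq_sorted a hfd
  | some k =>
    unfold Pre_parse at hPre
    rw [hfd] at hPre
    simp at hPre
    obtain ⟨h1, h9⟩ := hPre
    obtain ⟨u, P, w, t, hs, hk, hch, hlast, hw⟩ := fd_decomp a.toList k hfd
    exact parse_eq_descent a u P (a.toList.getD k ' ') w t hs hch hlast hw h1 h9
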